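-- pv_equiv track=rewrite | github.com/xKai808/Hyo | kai/memory/agent_memory/memory_engine.py | privacy_filter
-- ===== SOURCE A (Python) =====
-- PRIVACY_PATTERNS = [
--     "ANTHROPIC_API_KEY", "OPENAI_API_KEY", "TELEGRAM_BOT_TOKEN",
--     "sk-ant-", "sk-", "Bearer ", "password", "secret", ".token",
--     "founder.token", "hyo.env",
-- ]
--
-- def privacy_filter(content: str) -> str:
--     """Remove sensitive patterns from content before storing."""
--     for pattern in PRIVACY_PATTERNS:
--         # If the pattern appears in a line, redact that line
--         lines = content.split("\n")
--         filtered = []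
--         for line in lines:
--             if any(p.lower() in line.lower() for p in PRIVACY_PATTERNS):
--                 filtered.append("[REDACTED — contains sensitive data]")
--             else:
--                 filtered.append(line)
--         content = "\n".join(filtered)
--     return content
-- ===== SOURCE B (Python) =====
-- PRIVACY_PATTERNS = [
--     "ANTHROPIC_API_KEY", "OPENAI_API_KEY", "TELEGRAM_BOT_TOKEN",
--     "sk-ant-", "sk-", "Bearer ", "password", "secret", ".token",
--     "founder.token", "hyo.env",
-- ]
--
-- _REDACTED = "[REDACTED — contains sensitive data]"
-- _LOWERED = [p.lower() for p in PRIVACY_PATTERNS]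
--
--
-- def privacy_filter(content: str) -> str:
--     """Remove sensitive patterns from content before storing.
--
--     One global scan of the lowercased content: collect the line numbers of
--     every pattern occurrence (tracking the current line number while walking
--     the positions), then redact exactly those lines by index.
--     """
--     low = content.lower()
--     bad = set()  # line numbers containing a sensitive pattern
--     ln = 0
--     for i in range(len(low)):
--         if low[i] == "\n":
--             ln += 1
--         elif any(low.startswith(p, i) for p in _LOWERED):
--             bad.add(ln)
--     return "\n".join(
--         _REDACTED if k in bad else line
--         for k, line in enumerate(content.split("\n"))
--     )
-- ===== Notes on version B (the rewrite author's own statement) =====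
-- stated objective: alternative
-- what changed: B replaces A's per-line any-pattern substring tests (repeated 11x by A's redundant outer loop) with one global positional scan of the lowercased content that collects the set of line numbers where any pattern occurs (tracking the line counter at each offset), then redacts lines by index with enumerate; no per-line membership test remains.
import Mathlib
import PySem

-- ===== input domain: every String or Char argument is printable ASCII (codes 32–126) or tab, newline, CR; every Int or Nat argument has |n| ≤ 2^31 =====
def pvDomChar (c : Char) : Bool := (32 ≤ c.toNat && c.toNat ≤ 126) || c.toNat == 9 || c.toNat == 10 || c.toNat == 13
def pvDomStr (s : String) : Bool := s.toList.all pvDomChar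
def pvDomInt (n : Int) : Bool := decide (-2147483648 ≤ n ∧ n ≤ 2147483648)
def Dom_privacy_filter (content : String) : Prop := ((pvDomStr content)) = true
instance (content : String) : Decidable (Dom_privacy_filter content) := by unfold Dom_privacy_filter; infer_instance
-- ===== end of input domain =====

-- B replaces A's repeated per-line substring tests with one positional scan of the
-- lowercased content collecting the set of line numbers containing a match, then
-- redacts lines by index (objective: alternative; same result, different algorithm).

-- ===== PORT A =====
def PRIVACY_PATTERNS : List String :=
  ["ANTHROPIC_API_KEY", "OPENAI_API_KEY", "TELEGRAM_BOT_TOKEN",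
   "sk-ant-", "sk-", "Bearer ", "password", "secret", ".token",
   "founder.token", "hyo.env"]

def REDACTED : List Char := "[REDACTED — contains sensitive data]".toList

def privacy_filter (content : String) : String :=
  String.mk <| PRIVACY_PATTERNS.foldl (fun cont _pattern =>
    PySem.Chars.join ['\n']
      ((PySem.Chars.splitOn cont ['\n']).foldl (fun acc line =>
        if PRIVACY_PATTERNS.any (fun p =>
            PySem.Chars.isIn (PySem.Chars.lower p.toList) (PySem.Chars.lower line)) then
          acc ++ [REDACTED]
        else
          acc ++ [line]) ([] : List (List Char)))) content.toList

-- ===== PORT B =====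
def LOWERED_PATTERNS : List (List Char) :=
  PRIVACY_PATTERNS.map (fun p => PySem.Chars.lower p.toList)

-- any(low.startswith(p, i) for p in _LOWERED): Python reads low from offset i,
-- i.e. tests each pattern against the suffix low[i:] — exact on the suffix.
def anyMatch (s : List Char) : Bool :=
  LOWERED_PATTERNS.any (fun p => PySem.Chars.startswith s p)

-- the `for i in range(len(low))` loop: iteration i sees the suffix low[i:],
-- carries the current line number ln and the set `bad` of redacted line numbers.
def scanB : List Char → Int → PySem.Set Int → PySem.Set Int
  | [], _, bad => bad
  | c :: rest, ln, bad =>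
    if c = '\n' then scanB rest (ln + 1) bad
    else scanB rest ln (if anyMatch (c :: rest) then PySem.Set.add bad ln else bad)

def privacy_filter_alt (content : String) : String :=
  let low := PySem.Chars.lower content.toList
  let bad := scanB low 0 PySem.Set.empty
  String.mk (PySem.Chars.join ['\n']
    ((PySem.List.enumerate (PySem.Chars.splitOn content.toList ['\n']) 0).map
      (fun kl => if PySem.Set.contains bad kl.1 then REDACTED else kl.2)))

-- ===== PRECONDITION & SPEC =====
def Spec_privacy_filter (content : String) (out : String) : Prop := out = privacy_filter_alt content
instance (content : String) (out : String) : Decidable (Spec_privacy_filter content out) := by unfold Spec_privacy_filter; infer_instance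

-- ===== CLAIM (what is proved, stated in full; the proofs are below) =====
def Claim_equal_privacy_filter : Prop := ∀ (content : String), Dom_privacy_filter content → Spec_privacy_filter content (privacy_filter content)

-- ===== LEMMAS AND PROOFS =====

-- A's per-line redaction, as a function (proof-side helper).
def redact (line : List Char) : List Char :=
  if LOWERED_PATTERNS.any (fun p => PySem.Chars.isIn p (PySem.Chars.lower line)) then REDACTED
  else line

-- One filtering pass of A, in map form.
def stepA (cs : List Char) : List Char :=
  PySem.Chars.join ['\n'] ((PySem.Chars.splitOn cs ['\n']).map redact)

-- B's per-line hit test implied by the positional scan: some suffix starting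
-- strictly inside the line matches a pattern.
def hitL : List Char → Bool
  | [] => false
  | c :: r => anyMatch (c :: r) || hitL r

-- Every lowered pattern is nonempty and newline-free.
theorem pat_props : ∀ p ∈ LOWERED_PATTERNS, p ≠ [] ∧ '\n' ∉ p := by decide

-- A's per-line condition equals the lowered-patterns condition.
theorem cond_eq (line : List Char) :
    PRIVACY_PATTERNS.any (fun p =>
      PySem.Chars.isIn (PySem.Chars.lower p.toList) (PySem.Chars.lower line)) =
    LOWERED_PATTERNS.any (fun p => PySem.Chars.isIn p (PySem.Chars.lower line)) := by
  simp only [LOWERED_PATTERNS, List.any_map]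
  rfl

theorem redact_idem (l : List Char) : redact (redact l) = redact l := by
  unfold redact
  split <;> simp

-- splitOn.go never returns [] .
theorem go_ne_nil (fuel : Nat) (l cur : List Char) (acc : List (List Char)) :
    PySem.Chars.splitOn.go ['\n'] fuel l cur acc ≠ [] := by
  induction fuel generalizing l cur acc with
  | zero => simp [PySem.Chars.splitOn.go]
  | succ f ih =>
    cases l with
    | nil => simp [PySem.Chars.splitOn.go]
    | cons c rest =>
      simp only [PySem.Chars.splitOn.go]
      split
      · exact ih _ _ _
      · exact ih _ _ _

-- Every chunk produced by splitOn.go on separator '\n' contains no '\n'.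
theorem go_mem (fuel : Nat) (l cur : List Char) (acc : List (List Char))
    (hf : l.length < fuel) (hc : '\n' ∉ cur) (ha : ∀ m ∈ acc, '\n' ∉ m) :
    ∀ m ∈ PySem.Chars.splitOn.go ['\n'] fuel l cur acc, '\n' ∉ m := by
  induction fuel generalizing l cur acc with
  | zero => omega
  | succ f ih =>
    cases l with
    | nil =>
      intro m hm
      simp only [PySem.Chars.splitOn.go, List.mem_reverse, List.mem_cons] at hm
      rcases hm with h | h
      · subst h; simpa using hc
      · exact ha m h
    | cons c rest =>
      simp only [PySem.Chars.splitOn.go]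
      split
      · rename_i hpre
        apply ih
        · simp at hf ⊢; omega
        · simp
        · intro m hm
          rcases List.mem_cons.mp hm with h | h
          · subst h; simpa using hc
          · exact ha m h
      · rename_i hpre
        apply ih
        · simp at hf ⊢; omega
        · intro hmem
          rcases List.mem_cons.mp hmem with h | h
          · subst h
            apply hpre
            simp [List.isPrefixOf]
          · exact hc h
        · exact ha

-- Consuming a '\n'-free prefix just accumulates it into cur.
theorem go_skip (xs : List Char) (l cur : List Char) (acc : List (List Char)) (fuel : Nat)
    (hx : '\n' ∉ xs) (hf : xs.length + l.length < fuel) :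
    PySem.Chars.splitOn.go ['\n'] fuel (xs ++ l) cur acc =
    PySem.Chars.splitOn.go ['\n'] (fuel - xs.length) l (xs.reverse ++ cur) acc := by
  induction xs generalizing cur fuel with
  | nil => simp
  | cons c xs' ih =>
    cases fuel with
    | zero => omega
    | succ f =>
      have hc : c ≠ '\n' := by intro h; exact hx (by simp [h])
      simp only [List.cons_append, PySem.Chars.splitOn.go]
      rw [if_neg]
      · rw [ih (c :: cur) f (by intro h; exact hx (List.mem_cons_of_mem _ h)) (by simp at hf ⊢; omega)]
        simp
      · simp [List.isPrefixOf]
        intro h; exact hc h.symm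

-- Splitting the join of '\n'-free chunks recovers the chunks (go level).
theorem go_join (ls' : List (List Char)) (x cur : List Char) (acc : List (List Char)) (fuel : Nat)
    (hx : '\n' ∉ x) (hls : ∀ l ∈ ls', '\n' ∉ l)
    (hf : (PySem.Chars.join ['\n'] (x :: ls')).length < fuel) :
    PySem.Chars.splitOn.go ['\n'] fuel (PySem.Chars.join ['\n'] (x :: ls')) cur acc =
    acc.reverse ++ (cur.reverse ++ x) :: ls' := by
  induction ls' generalizing x cur acc fuel with
  | nil =>
    have hj : PySem.Chars.join ['\n'] [x] = x := by
      simp [PySem.Chars.join, List.intercalate]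
    rw [hj] at hf ⊢
    have h2 : PySem.Chars.splitOn.go ['\n'] fuel x cur acc =
        PySem.Chars.splitOn.go ['\n'] (fuel - x.length) [] (x.reverse ++ cur) acc := by
      simpa using go_skip x [] cur acc fuel hx (by simpa using hf)
    rw [h2]
    cases h : fuel - x.length <;> simp [PySem.Chars.splitOn.go]
  | cons y ls'' ih =>
    have hj : PySem.Chars.join ['\n'] (x :: y :: ls'') =
        x ++ '\n' :: PySem.Chars.join ['\n'] (y :: ls'') := by
      simp [PySem.Chars.join, List.intercalate, List.intersperse]
    rw [hj] at hf ⊢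
    rw [go_skip x _ cur acc fuel hx (by simp at hf ⊢; omega)]
    rcases Nat.exists_eq_add_of_lt
      (show (PySem.Chars.join ['\n'] (y :: ls'')).length + 1 < fuel - x.length by
        simp at hf ⊢; omega) with ⟨k, hk⟩
    rw [show fuel - x.length = (PySem.Chars.join ['\n'] (y :: ls'')).length + 1 + k + 1 from hk]
    simp only [PySem.Chars.splitOn.go]
    rw [if_pos (by simp [List.isPrefixOf])]
    simp only [List.length_cons, List.length_nil, List.drop_succ_cons, List.drop_zero,
      List.reverse_append, List.reverse_reverse]
    rw [ih y [] _ _ (hls y (by simp)) (fun l hl => hls l (by simp [hl])) (by omega)]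
    simp

theorem splitOn_join (x : List Char) (ls' : List (List Char))
    (hx : '\n' ∉ x) (hls : ∀ l ∈ ls', '\n' ∉ l) :
    PySem.Chars.splitOn (PySem.Chars.join ['\n'] (x :: ls')) ['\n'] = x :: ls' := by
  unfold PySem.Chars.splitOn
  rw [go_join ls' x [] [] _ hx hls (by omega)]
  simp

theorem splitOn_ne_nil (cs : List Char) : PySem.Chars.splitOn cs ['\n'] ≠ [] :=
  go_ne_nil _ _ _ _

theorem splitOn_no_nl (cs : List Char) : ∀ m ∈ PySem.Chars.splitOn cs ['\n'], '\n' ∉ m :=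
  go_mem _ _ _ _ (Nat.lt_succ_self _) (by simp) (by simp)

theorem redact_no_nl (l : List Char) (h : '\n' ∉ l) : '\n' ∉ redact l := by
  unfold redact
  split
  · decide
  · exact h

theorem stepA_idem (cs : List Char) : stepA (stepA cs) = stepA cs := by
  unfold stepA
  rcases hls : (PySem.Chars.splitOn cs ['\n']).map redact with _ | ⟨x, ls'⟩
  · exact absurd (List.map_eq_nil_iff.mp hls) (splitOn_ne_nil cs)
  · have hmem : ∀ l ∈ x :: ls', '\n' ∉ l := by
      rw [← hls]
      intro l hl
      rcases List.mem_map.mp hl with ⟨m, hm, rfl⟩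
      exact redact_no_nl m (splitOn_no_nl cs m hm)
    rw [splitOn_join x ls' (hmem x (by simp)) (fun l hl => hmem l (by simp [hl]))]
    rw [← hls, List.map_map]
    congr 1
    apply List.map_congr_left
    intro l _
    exact redact_idem l

-- One pass of A's outer loop body equals stepA.
theorem inner_eq (cont : List Char) :
    PySem.Chars.join ['\n']
      ((PySem.Chars.splitOn cont ['\n']).foldl (fun acc line =>
        if PRIVACY_PATTERNS.any (fun p =>
            PySem.Chars.isIn (PySem.Chars.lower p.toList) (PySem.Chars.lower line)) then
          acc ++ [REDACTED]
        else
          acc ++ [line]) ([] : List (List Char))) = stepA cont := by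
  unfold stepA
  congr 1
  rw [PySem.List.foldl_congr_mem (PySem.Chars.splitOn cont ['\n'])
      (fun acc line =>
        if PRIVACY_PATTERNS.any (fun p =>
            PySem.Chars.isIn (PySem.Chars.lower p.toList) (PySem.Chars.lower line)) then
          acc ++ [REDACTED]
        else acc ++ [line])
      (fun acc line => acc ++ [redact line]) []
      (by intro acc line _; simp only []; rw [cond_eq]; unfold redact; split <;> simp_all)]
  rw [PySem.List.foldl_append_singleton_eq_map]
  simp

-- The outer loop iterates stepA, which is idempotent.
theorem foldl_const_step (l : List String) (cs : List Char) :
    l.foldl (fun c (_ : String) => stepA c) (stepA cs) = stepA cs := by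
  induction l generalizing cs with
  | nil => rfl
  | cons p rest ih =>
    simp only [List.foldl_cons]
    rw [stepA_idem]
    exact ih cs

-- A computes one (idempotent) filtering pass.
theorem A_eq_stepA (content : String) :
    privacy_filter content = String.mk (stepA content.toList) := by
  unfold privacy_filter
  rw [show (fun (cont : List Char) (_pattern : String) =>
        PySem.Chars.join ['\n']
          ((PySem.Chars.splitOn cont ['\n']).foldl (fun acc line =>
            if PRIVACY_PATTERNS.any (fun p =>
                PySem.Chars.isIn (PySem.Chars.lower p.toList) (PySem.Chars.lower line)) then
              acc ++ [REDACTED]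
            else
              acc ++ [line]) ([] : List (List Char)))) =
      (fun cont (_ : String) => stepA cont) from
    funext fun cont => funext fun _ => inner_eq cont]
  have h11 : PRIVACY_PATTERNS = "ANTHROPIC_API_KEY" ::
      ["OPENAI_API_KEY", "TELEGRAM_BOT_TOKEN", "sk-ant-", "sk-", "Bearer ", "password",
       "secret", ".token", "founder.token", "hyo.env"] := rfl
  rw [h11, List.foldl_cons, foldl_const_step]

-- ===== B-side lemmas =====

-- go with an accumulator splits off acc.reverse.
theorem go_acc (fuel : Nat) (l cur : List Char) (acc : List (List Char)) :
    PySem.Chars.splitOn.go ['\n'] fuel l cur acc =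
    acc.reverse ++ PySem.Chars.splitOn.go ['\n'] fuel l cur [] := by
  induction fuel generalizing l cur acc with
  | zero => simp [PySem.Chars.splitOn.go]
  | succ f ih =>
    cases l with
    | nil => simp [PySem.Chars.splitOn.go]
    | cons c rest =>
      simp only [PySem.Chars.splitOn.go]
      split
      · rw [ih _ _ (cur.reverse :: acc), ih _ _ [cur.reverse]]
        simp
      · exact ih _ _ _

-- Joining the chunks of go reconstructs the remaining input.
theorem join_go (fuel : Nat) (l cur : List Char) (hf : l.length < fuel) :
    PySem.Chars.join ['\n'] (PySem.Chars.splitOn.go ['\n'] fuel l cur []) =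
    cur.reverse ++ l := by
  induction fuel generalizing l cur with
  | zero => omega
  | succ f ih =>
    cases l with
    | nil => simp [PySem.Chars.splitOn.go, PySem.Chars.join_singleton]
    | cons c rest =>
      simp only [PySem.Chars.splitOn.go]
      split
      · rename_i hpre
        have hc : c = '\n' := by
          have h' := hpre
          simp [List.isPrefixOf] at h'
          exact h'.symm
        rw [go_acc f _ [] [List.reverse cur]]
        simp only [List.reverse_cons, List.reverse_nil, List.nil_append, List.singleton_append]
        rcases List.exists_cons_of_ne_nil
          (go_ne_nil f (List.drop (['\n'] : List Char).length (c :: rest)) [] []) with ⟨y, zs, hyz⟩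
        rw [hyz, PySem.Chars.join_cons_cons, ← hyz,
          show List.drop (['\n'] : List Char).length (c :: rest) = rest from rfl,
          ih rest [] (by simp at hf ⊢; omega)]
        simp [hc]
      · rw [ih rest (c :: cur) (by simp at hf ⊢; omega)]
        simp
theorem join_splitOn (cs : List Char) :
    PySem.Chars.join ['\n'] (PySem.Chars.splitOn cs ['\n']) = cs := by
  unfold PySem.Chars.splitOn
  simpa using join_go (cs.length + 1) cs [] (by omega)

theorem lowerChar_ne_nl (c : Char) (h : c ≠ '\n') : PySem.Chars.lowerChar c ≠ '\n' := by
  unfold PySem.Chars.lowerChar PySem.Chars.isupper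
  split
  · rename_i hu
    simp only [Bool.and_eq_true, decide_eq_true_eq, Char.le_def] at hu
    intro he
    have hz : c.toNat ≤ 90 := hu.2
    have ha : 65 ≤ c.toNat := hu.1
    have h1 : (Char.ofNat (c.toNat + 32)).toNat = c.toNat + 32 := by
      rw [Char.toNat_ofNat, if_pos]
      left; omega
    rw [he] at h1
    have : ('\n').toNat = 10 := rfl
    omega
  · exact h

theorem nl_not_mem_lower (l : List Char) (h : '\n' ∉ l) : '\n' ∉ PySem.Chars.lower l := by
  intro hm
  rcases List.mem_map.mp hm with ⟨c, hc, he⟩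
  exact lowerChar_ne_nl c (fun hce => h (hce ▸ hc)) he

-- lower distributes over a '\n'-join.
theorem lower_join (ls : List (List Char)) :
    PySem.Chars.lower (PySem.Chars.join ['\n'] ls) =
    PySem.Chars.join ['\n'] (ls.map PySem.Chars.lower) := by
  induction ls with
  | nil => simp [PySem.Chars.join_nil, PySem.Chars.lower]
  | cons x ls' ih =>
    cases ls' with
    | nil => simp [PySem.Chars.join_singleton]
    | cons y ls'' =>
      simp only [List.map_cons, PySem.Chars.join_cons_cons, PySem.Chars.lower,
        List.map_append] at ih ⊢
      rw [ih]
      rfl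

-- A '\n'-free pattern matches at the junction-free part only.
theorem prefix_append_nl (p a b : List Char) (hp : '\n' ∉ p) :
    p.isPrefixOf (a ++ '\n' :: b) = p.isPrefixOf a := by
  induction p generalizing a with
  | nil => simp [List.isPrefixOf]
  | cons q p' ih =>
    cases a with
    | nil =>
      have hq : q ≠ '\n' := fun h => hp (by simp [h])
      simp [List.isPrefixOf, hq]
    | cons x a' =>
      simp only [List.cons_append, List.isPrefixOf]
      rw [ih a' (fun h => hp (List.mem_cons_of_mem _ h))]

theorem anyMatch_append_nl (a b : List Char) :
    anyMatch (a ++ '\n' :: b) = anyMatch a := by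
  unfold anyMatch
  rw [Bool.eq_iff_iff]
  simp only [List.any_eq_true, PySem.Chars.startswith]
  constructor
  · rintro ⟨p, hp, h⟩
    exact ⟨p, hp, by rwa [prefix_append_nl p a b (pat_props p hp).2] at h⟩
  · rintro ⟨p, hp, h⟩
    exact ⟨p, hp, by rwa [prefix_append_nl p a b (pat_props p hp).2]⟩

theorem mem_iff_contains (s : PySem.Set Int) (x : Int) :
    x ∈ s ↔ PySem.Set.contains s x = true := by
  simp [PySem.Set.contains]

-- Scanning one '\n'-free line adds its line number iff it has a hit.
theorem scan_line (l rest : List Char) (k : Int) (bad : PySem.Set Int) (hl : '\n' ∉ l) :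
    scanB (l ++ '\n' :: rest) k bad =
    scanB rest (k + 1) (if hitL l then PySem.Set.add bad k else bad) := by
  induction l generalizing bad with
  | nil => simp [scanB, hitL]
  | cons c l' ih =>
    have hc : c ≠ '\n' := fun h => hl (by simp [h])
    simp only [List.cons_append, scanB, if_neg hc]
    rw [show (c :: (l' ++ '\n' :: rest)) = ((c :: l') ++ '\n' :: rest) from rfl,
      anyMatch_append_nl]
    rw [ih _ (fun h => hl (List.mem_cons_of_mem _ h))]
    congr 1
    simp only [hitL]
    by_cases h1 : anyMatch (c :: l') <;> by_cases h2 : hitL l' <;>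
      simp [h1, h2]

-- Scanning the trailing '\n'-free line.
theorem scan_last (l : List Char) (k : Int) (bad : PySem.Set Int) (hl : '\n' ∉ l) :
    scanB l k bad = if hitL l then PySem.Set.add bad k else bad := by
  induction l generalizing bad with
  | nil => simp [scanB, hitL]
  | cons c l' ih =>
    have hc : c ≠ '\n' := fun h => hl (by simp [h])
    simp only [scanB, if_neg hc, hitL]
    rw [ih _ (fun h => hl (List.mem_cons_of_mem _ h))]
    by_cases h1 : anyMatch (c :: l') <;> by_cases h2 : hitL l' <;>
      simp [h1, h2]

-- Membership in the scan of a nonempty join of '\n'-free lines.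
theorem mem_scan_join (lls : List (List Char)) (hne : lls ≠ []) (k : Int) (bad : PySem.Set Int)
    (m : Int) (hls : ∀ l ∈ lls, '\n' ∉ l) :
    m ∈ scanB (PySem.Chars.join ['\n'] lls) k bad ↔
    m ∈ bad ∨ ∃ j : Nat, ∃ h : j < lls.length, m = k + (j : Int) ∧ hitL lls[j] := by
  induction lls generalizing k bad with
  | nil => exact absurd rfl hne
  | cons x lls' ih =>
    cases lls' with
    | nil =>
      rw [PySem.Chars.join_singleton, scan_last x k bad (hls x (by simp))]
      constructor
      · intro hm
        split at hm
        · rename_i hhit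
          rcases (PySem.Set.mem_add bad k m).mp hm with h | h
          · exact Or.inl h
          · exact Or.inr ⟨0, by simp, by simpa using h, by simpa using hhit⟩
        · exact Or.inl hm
      · rintro (h | ⟨j, hj, hm, hhit⟩)
        · split
          · exact (PySem.Set.mem_add bad k m).mpr (Or.inl h)
          · exact h
        · have hj0 : j = 0 := by simpa using hj
          subst hj0
          simp only [List.getElem_cons_zero] at hhit
          rw [if_pos hhit]
          exact (PySem.Set.mem_add bad k m).mpr (Or.inr (by simpa using hm))
    | cons y lls'' =>
      rw [PySem.Chars.join_cons_cons,
        show x ++ ['\n'] ++ PySem.Chars.join ['\n'] (y :: lls'') =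
          x ++ '\n' :: PySem.Chars.join ['\n'] (y :: lls'') by simp,
        scan_line x _ k bad (hls x (by simp))]
      rw [ih (by simp) (k + 1) _ (fun l hl => hls l (by simp [hl]))]
      have hbad' : m ∈ (if hitL x then PySem.Set.add bad k else bad) ↔
          m ∈ bad ∨ (hitL x = true ∧ m = k) := by
        split
        · rename_i h
          rw [PySem.Set.mem_add]
          simp [h]
        · rename_i h
          simp [h]
      rw [hbad']
      constructor
      · rintro ((h | ⟨hhit, rfl⟩) | ⟨j, hj, hm, hhit⟩)
        · exact Or.inl h
        · exact Or.inr ⟨0, by simp, by simp, by simpa using hhit⟩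
        · exact Or.inr ⟨j + 1, by simpa using hj, by push_cast at hm ⊢; omega,
            by simpa using hhit⟩
      · rintro (h | ⟨j, hj, hm, hhit⟩)
        · exact Or.inl (Or.inl h)
        · cases j with
          | zero =>
            exact Or.inl (Or.inr ⟨by simpa using hhit, by simpa using hm⟩)
          | succ j' =>
            exact Or.inr ⟨j', by simpa using hj, by push_cast at hm ⊢; omega,
              by simpa using hhit⟩

-- hitL = "some strict suffix matches".
theorem hit_iff (s : List Char) :
    hitL s = true ↔ ∃ j, j < s.length ∧ anyMatch (List.drop j s) = true := by
  induction s with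
  | nil => simp [hitL]
  | cons c r ih =>
    simp only [hitL, Bool.or_eq_true, ih]
    constructor
    · rintro (h | ⟨j, hj, hm⟩)
      · exact ⟨0, by simp, by simpa using h⟩
      · exact ⟨j + 1, by simpa using hj, by simpa using hm⟩
    · rintro ⟨j, hj, hm⟩
      cases j with
      | zero => exact Or.inl (by simpa using hm)
      | succ j' => exact Or.inr ⟨j', by simpa using hj, by simpa using hm⟩

-- hitL coincides with A's lowered-pattern containment test.
theorem hit_eq_any_isIn (s : List Char) :
    hitL s = LOWERED_PATTERNS.any (fun p => PySem.Chars.isIn p s) := by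
  rw [Bool.eq_iff_iff, hit_iff]
  constructor
  · rintro ⟨j, hj, hm⟩
    rcases List.any_eq_true.mp hm with ⟨p, hp, hpre⟩
    refine List.any_eq_true.mpr ⟨p, hp, ?_⟩
    rw [← PySem.Chars.exists_prefix_drop_iff_isIn]
    exact ⟨j, by simpa [PySem.Chars.startswith, List.isPrefixOf_iff_prefix] using hpre⟩
  · intro h
    rcases List.any_eq_true.mp h with ⟨p, hp, hin⟩
    rcases (PySem.Chars.exists_prefix_drop_iff_isIn p s).mpr hin with ⟨j, hpre⟩
    refine ⟨j, ?_, List.any_eq_true.mpr ⟨p, hp,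
      by simpa [PySem.Chars.startswith, List.isPrefixOf_iff_prefix] using hpre⟩⟩
    by_contra hge
    have hdrop : List.drop j s = [] := List.drop_eq_nil_of_le (by omega)
    rw [hdrop, List.prefix_nil] at hpre
    exact (pat_props p hp).1 hpre

-- B computes the same single filtering pass.
theorem B_eq_stepA (content : String) :
    privacy_filter_alt content = String.mk (stepA content.toList) := by
  have hfree : ∀ l ∈ PySem.Chars.splitOn content.toList ['\n'], '\n' ∉ l :=
    splitOn_no_nl content.toList
  have hlow : PySem.Chars.lower content.toList =
      PySem.Chars.join ['\n']
        ((PySem.Chars.splitOn content.toList ['\n']).map PySem.Chars.lower) := by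
    conv_lhs => rw [← join_splitOn content.toList]
    exact lower_join _
  have hmem : ∀ (i : Nat) (hi : i < (PySem.Chars.splitOn content.toList ['\n']).length),
      (((i : Int) ∈ scanB (PySem.Chars.lower content.toList) 0 PySem.Set.empty) ↔
        hitL (PySem.Chars.lower (PySem.Chars.splitOn content.toList ['\n'])[i]) = true) := by
    intro i hi
    rw [hlow, mem_scan_join ((PySem.Chars.splitOn content.toList ['\n']).map PySem.Chars.lower)
      (by simpa using splitOn_ne_nil content.toList) 0 PySem.Set.empty (i : Int)
      (by
        intro l hl
        rcases List.mem_map.mp hl with ⟨l0, hl0, rfl⟩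
        exact nl_not_mem_lower l0 (hfree l0 hl0))]
    have hempty : ((i : Int) ∈ (PySem.Set.empty : PySem.Set Int)) ↔ False := by
      simp [PySem.Set.empty]
    rw [hempty]
    constructor
    · rintro (h | ⟨j, hj, hm, hhit⟩)
      · exact h.elim
      · have hij : i = j := by
          have hm' : (i : Int) = (j : Int) := by simpa using hm
          exact_mod_cast hm'
        subst hij
        rwa [List.getElem_map] at hhit
    · intro h
      exact Or.inr ⟨i, by simpa using hi, by simp, by rwa [List.getElem_map]⟩
  have hmap : (PySem.List.enumerate (PySem.Chars.splitOn content.toList ['\n']) 0).map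
      (fun kl => if PySem.Set.contains
          (scanB (PySem.Chars.lower content.toList) 0 PySem.Set.empty) kl.1 then REDACTED
        else kl.2) =
      (PySem.Chars.splitOn content.toList ['\n']).map redact := by
    apply List.ext_getElem
    · simp [PySem.List.length_enumerate]
    · intro i h1 h2
      have hi : i < (PySem.Chars.splitOn content.toList ['\n']).length := by
        simpa [PySem.List.length_enumerate] using h1
      rw [List.getElem_map, List.getElem_map, PySem.List.getElem_enumerate]
      simp only [zero_add]
      unfold redact
      rw [← hit_eq_any_isIn]
      by_cases hb : ((i : Int) ∈ scanB (PySem.Chars.lower content.toList) 0 PySem.Set.empty)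
      · rw [if_pos ((mem_iff_contains _ _).mp hb), if_pos ((hmem i hi).mp hb)]
      · rw [if_neg (fun hc => hb ((mem_iff_contains _ _).mpr hc)),
          if_neg (fun hh => hb ((hmem i hi).mpr hh))]
  unfold privacy_filter_alt stepA
  dsimp only
  rw [hmap]

-- ===== VERDICT (by name: the statement is the Claim_ definition above) =====
theorem privacy_filter_spec : Claim_equal_privacy_filter := by
  intro content _
  unfold Spec_privacy_filter
  rw [A_eq_stepA, B_eq_stepA]
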